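-- pv_equiv track=rewrite | github.com/tanasa/python.das | DSA_python_QueueHandsOn_Bogdan_Tanasa2.py | bank_counter
-- ===== SOURCE A (Python) =====
-- def bank_counter(arrival_times, transaction_times):
--
--     total_waiting_time = 0
--     monitoring_time = 0
--
--     # Monitoring each customer's waiting time
--
--     for i in range(len(arrival_times)):
--
--         arrival_time = arrival_times[i]
--         transaction_time = transaction_times[i]
--
--         # If the customer arrives after the current time, we update monitoring_time to the time of its arrival ;
--         # there is no waiting time
--
--         if monitoring_time < arrival_time:
--              monitoring_time = arrival_time       # Update the monitoring_time to the customer's arrival time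
--
--         # Calculate waiting time for this customer
--         waiting_time = monitoring_time - arrival_time
--
--         # Add this customer's waiting time to the total
--         total_waiting_time += waiting_time
--
--         # Update current time to account for this customer's transaction
--         monitoring_time += transaction_time
--
--     return total_waiting_time
-- ===== SOURCE B (Python) =====
-- def bank_counter(arrival_times, transaction_times):
--     # Closed form instead of queue simulation: customer i starts service at
--     # T[i] + M[i+1], where T[i] is the prefix sum of the first i transaction
--     # times and M[i+1] = max(0, max over k<=i of (arrival[k] - T[k])); so
--     # waiting_i = T[i] + M[i+1] - arrival[i].
--     n = len(arrival_times)
--     T = [0]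
--     for i in range(n):
--         T.append(T[i] + transaction_times[i])
--     M = [0]
--     for i in range(n):
--         M.append(max(M[i], arrival_times[i] - T[i]))
--     return sum(T[i] + M[i + 1] - arrival_times[i] for i in range(n))
-- ===== Notes on version B (the rewrite author's own statement) =====
-- stated objective: alternative
-- what changed: Replaces A's queue simulation (running monitoring_time clock with a conditional jump to each arrival) by a closed-form computation: a prefix-sum table T of transaction times, a running-maximum table M of arrival[k]-T[k], and waiting_i = T[i] + M[i+1] - arrival[i] summed in a final pass.
import Mathlib
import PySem

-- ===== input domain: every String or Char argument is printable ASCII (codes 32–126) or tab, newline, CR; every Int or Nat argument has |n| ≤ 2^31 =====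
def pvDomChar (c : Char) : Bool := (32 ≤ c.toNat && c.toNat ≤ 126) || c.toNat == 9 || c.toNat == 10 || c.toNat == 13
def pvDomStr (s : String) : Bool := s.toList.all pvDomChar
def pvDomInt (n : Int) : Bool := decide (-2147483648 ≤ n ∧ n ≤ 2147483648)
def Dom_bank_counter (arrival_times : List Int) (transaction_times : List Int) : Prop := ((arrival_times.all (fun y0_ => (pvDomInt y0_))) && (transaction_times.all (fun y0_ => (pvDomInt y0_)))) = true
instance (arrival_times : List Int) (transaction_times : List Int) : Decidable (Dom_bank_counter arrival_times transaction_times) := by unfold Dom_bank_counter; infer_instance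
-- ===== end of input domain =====

-- B replaces A's queue simulation by a closed form built from a prefix-sum table and a running-max table; same return value.

-- ===== PORT A =====
def bank_counter (arrival_times : List Int) (transaction_times : List Int) : Int :=
  ((PySem.List.pyRange 0 arrival_times.length 1).foldl
    (fun (s : Int × Int) i =>
      let arrival_time := PySem.List.pyGetD arrival_times i 0
      let transaction_time := PySem.List.pyGetD transaction_times i 0
      let monitoring_time := if s.2 < arrival_time then arrival_time else s.2
      (s.1 + (monitoring_time - arrival_time), monitoring_time + transaction_time))
    (0, 0)).1

-- ===== PORT B =====
def bank_counter_alt (arrival_times : List Int) (transaction_times : List Int) : Int :=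
  let n := arrival_times.length
  let T := (PySem.List.pyRange 0 n 1).foldl
    (fun (T : List Int) i => T ++ [PySem.List.pyGetD T i 0 + PySem.List.pyGetD transaction_times i 0])
    [0]
  let M := (PySem.List.pyRange 0 n 1).foldl
    (fun (M : List Int) i => M ++ [max (PySem.List.pyGetD M i 0) (PySem.List.pyGetD arrival_times i 0 - PySem.List.pyGetD T i 0)])
    [0]
  (PySem.List.pyRange 0 n 1).foldl
    (fun s i => s + (PySem.List.pyGetD T i 0 + PySem.List.pyGetD M (i + 1) 0 - PySem.List.pyGetD arrival_times i 0)) 0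

-- ===== PRECONDITION & SPEC =====
-- Pre_ excludes exactly the inputs where A raises IndexError: transaction_times shorter than arrival_times (B raises there too).
def Pre_bank_counter (arrival_times : List Int) (transaction_times : List Int) : Prop :=
  arrival_times.length ≤ transaction_times.length
instance (arrival_times : List Int) (transaction_times : List Int) : Decidable (Pre_bank_counter arrival_times transaction_times) := by unfold Pre_bank_counter; infer_instance
def pvWitness_bank_counter : List Int × List Int := ([3, 2, 10], [4, 5, 1])

def Spec_bank_counter (arrival_times : List Int) (transaction_times : List Int) (out : Int) : Prop := out = bank_counter_alt arrival_times transaction_times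
instance (arrival_times : List Int) (transaction_times : List Int) (out : Int) : Decidable (Spec_bank_counter arrival_times transaction_times out) := by unfold Spec_bank_counter; infer_instance

-- ===== CLAIM (what is proved, stated in full; the proofs are below) =====
def Claim_equal_bank_counter : Prop := ∀ (arrival_times : List Int) (transaction_times : List Int), Dom_bank_counter arrival_times transaction_times → Pre_bank_counter arrival_times transaction_times → Spec_bank_counter arrival_times transaction_times (bank_counter arrival_times transaction_times)

-- ===== LEMMAS AND PROOFS =====

-- generic builder: the shape of B's two table-building loops (each new entry is h(last entry, i))
def pvBuild (h : List Int → Int → Int) (m : Nat) : List Int :=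
  (PySem.List.pyRange 0 (m : Int) 1).foldl (fun (L : List Int) i => L ++ [h L i]) [0]

theorem pvBuild_succ (h : List Int → Int → Int) (m : Nat) :
    pvBuild h (m + 1) = pvBuild h m ++ [h (pvBuild h m) (m : Int)] := by
  unfold pvBuild
  have := PySem.List.pyRange_one_succ_right (a := 0) (b := (m : Int)) (by positivity)
  push_cast
  rw [this, List.foldl_append, List.foldl_cons, List.foldl_nil]

theorem pvBuild_len (h : List Int → Int → Int) (m : Nat) :
    (pvBuild h m).length = m + 1 := by
  induction m with
  | zero => simp [pvBuild]
  | succ k ih => rw [pvBuild_succ]; simp [ih]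

theorem pvBuild_prefix (h : List Int → Int → Int) {m n : Nat} (hmn : m ≤ n) :
    pvBuild h m <+: pvBuild h n := by
  induction hmn with
  | refl => exact List.prefix_rfl
  | step _ ih => exact ih.trans (by rw [pvBuild_succ]; exact List.prefix_append _ _)

theorem pyGetD_append_lt (xs ys : List Int) (i : Int) (h0 : 0 ≤ i) (h : i < xs.length) :
    PySem.List.pyGetD (xs ++ ys) i 0 = PySem.List.pyGetD xs i 0 := by
  rw [PySem.List.pyGetD_eq_getElem (xs ++ ys) 0 h0 (by simp; omega),
      PySem.List.pyGetD_eq_getElem xs 0 h0 h,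
      List.getElem_append_left (by omega)]

theorem pyGetD_append_len (xs : List Int) (e : Int) :
    PySem.List.pyGetD (xs ++ [e]) (xs.length : Int) 0 = e := by
  rw [PySem.List.pyGetD_eq_getElem (xs ++ [e]) 0 (by positivity) (by simp)]
  simp

theorem pvBuild_getD_stable (h : List Int → Int → Int) {i m n : Nat} (him : i ≤ m) (hmn : m ≤ n) :
    PySem.List.pyGetD (pvBuild h n) (i : Int) 0 = PySem.List.pyGetD (pvBuild h m) (i : Int) 0 := by
  obtain ⟨s, hs⟩ := pvBuild_prefix h hmn
  rw [← hs, pyGetD_append_lt _ _ _ (by positivity) (by rw [pvBuild_len]; push_cast; omega)]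

theorem pvBuild_getD_zero (h : List Int → Int → Int) (n : Nat) :
    PySem.List.pyGetD (pvBuild h n) 0 0 = 0 := by
  have := pvBuild_getD_stable h (i := 0) (m := 0) (n := n) le_rfl (Nat.zero_le n)
  simpa [pvBuild, PySem.List.pyGetD] using this

theorem pvBuild_getD_succ (h : List Int → Int → Int) {m n : Nat} (hmn : m < n) :
    PySem.List.pyGetD (pvBuild h n) ((m : Int) + 1) 0 = h (pvBuild h m) (m : Int) := by
  have h1 : PySem.List.pyGetD (pvBuild h n) ((m : Int) + 1) 0
      = PySem.List.pyGetD (pvBuild h (m + 1)) ((m : Int) + 1) 0 := by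
    have := pvBuild_getD_stable h (i := m + 1) (m := m + 1) (n := n) le_rfl hmn
    push_cast at this
    exact this
  rw [h1, pvBuild_succ]
  have := pyGetD_append_len (pvBuild h m) (h (pvBuild h m) (m : Int))
  rwa [pvBuild_len, Nat.cast_add, Nat.cast_one] at this

-- main invariant: A's fold state after m steps is (B's partial sum over range m, T[m] + M[m])
theorem key (a t : List Int)
    (hT : ∀ m : Nat, m < a.length →
      PySem.List.pyGetD (pvBuild (fun L i => PySem.List.pyGetD L i 0 + PySem.List.pyGetD t i 0) a.length) ((m : Int) + 1) 0
        = PySem.List.pyGetD (pvBuild (fun L i => PySem.List.pyGetD L i 0 + PySem.List.pyGetD t i 0) a.length) (m : Int) 0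
          + PySem.List.pyGetD t (m : Int) 0)
    (hM : ∀ m : Nat, m < a.length →
      PySem.List.pyGetD (pvBuild (fun L i => max (PySem.List.pyGetD L i 0) (PySem.List.pyGetD a i 0 - PySem.List.pyGetD (pvBuild (fun L i => PySem.List.pyGetD L i 0 + PySem.List.pyGetD t i 0) a.length) i 0)) a.length) ((m : Int) + 1) 0
        = max (PySem.List.pyGetD (pvBuild (fun L i => max (PySem.List.pyGetD L i 0) (PySem.List.pyGetD a i 0 - PySem.List.pyGetD (pvBuild (fun L i => PySem.List.pyGetD L i 0 + PySem.List.pyGetD t i 0) a.length) i 0)) a.length) (m : Int) 0)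
            (PySem.List.pyGetD a (m : Int) 0 - PySem.List.pyGetD (pvBuild (fun L i => PySem.List.pyGetD L i 0 + PySem.List.pyGetD t i 0) a.length) (m : Int) 0))
    (n : Nat) (hn : n ≤ a.length) :
    (let Tf := pvBuild (fun L i => PySem.List.pyGetD L i 0 + PySem.List.pyGetD t i 0) a.length;
     let Mf := pvBuild (fun L i => max (PySem.List.pyGetD L i 0) (PySem.List.pyGetD a i 0 - PySem.List.pyGetD Tf i 0)) a.length;
     let sA := (PySem.List.pyRange 0 (n : Int) 1).foldl
        (fun (s : Int × Int) i =>
          let arrival_time := PySem.List.pyGetD a i 0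
          let transaction_time := PySem.List.pyGetD t i 0
          let monitoring_time := if s.2 < arrival_time then arrival_time else s.2
          (s.1 + (monitoring_time - arrival_time), monitoring_time + transaction_time)) (0, 0);
     sA.2 = PySem.List.pyGetD Tf (n : Int) 0 + PySem.List.pyGetD Mf (n : Int) 0 ∧
     sA.1 = (PySem.List.pyRange 0 (n : Int) 1).foldl
        (fun s i => s + (PySem.List.pyGetD Tf i 0 + PySem.List.pyGetD Mf (i + 1) 0 - PySem.List.pyGetD a i 0)) 0) := by
  intro Tf Mf
  induction n with
  | zero =>
    refine ⟨?_, by simp⟩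
    simp only [Tf, Mf]
    simp [pvBuild_getD_zero]
  | succ m ih =>
    have hm : m ≤ a.length := Nat.le_of_succ_le hn
    have hmlt : m < a.length := hn
    obtain ⟨hmon, hsum⟩ := ih hm
    have hsplit : PySem.List.pyRange 0 ((m + 1 : Nat) : Int) 1
        = PySem.List.pyRange 0 (m : Int) 1 ++ [(m : Int)] := by
      have := PySem.List.pyRange_one_succ_right (a := 0) (b := (m : Int)) (by positivity)
      push_cast
      simpa using this
    simp only [hsplit, List.foldl_append, List.foldl_cons, List.foldl_nil]
    have hTr := hT m hmlt
    have hMr := hM m hmlt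
    set Trm := PySem.List.pyGetD Tf (m : Int) 0 with hTrm
    set Mrm := PySem.List.pyGetD Mf (m : Int) 0 with hMrm
    set am := PySem.List.pyGetD a (m : Int) 0 with ham
    set tm := PySem.List.pyGetD t (m : Int) 0 with htm
    push_cast
    rw [hTr, hMr]
    constructor
    · rw [hmon]
      simp only [max_def]
      split_ifs <;> omega
    · rw [hsum, hmon]
      simp only [max_def]
      split_ifs <;> ring_nf <;> omega

-- ===== VERDICT (by name: the statement is the Claim_ definition above) =====
theorem bank_counter_spec : Claim_equal_bank_counter := by
  intro a t _ _
  simp only [Spec_bank_counter, bank_counter, bank_counter_alt]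
  have hT : ∀ m : Nat, m < a.length →
      PySem.List.pyGetD (pvBuild (fun L i => PySem.List.pyGetD L i 0 + PySem.List.pyGetD t i 0) a.length) ((m : Int) + 1) 0
        = PySem.List.pyGetD (pvBuild (fun L i => PySem.List.pyGetD L i 0 + PySem.List.pyGetD t i 0) a.length) (m : Int) 0
          + PySem.List.pyGetD t (m : Int) 0 := by
    intro m hmlt
    rw [pvBuild_getD_succ _ hmlt, pvBuild_getD_stable _ (le_refl m) (Nat.le_of_lt hmlt)]
  have hM : ∀ m : Nat, m < a.length →
      PySem.List.pyGetD (pvBuild (fun L i => max (PySem.List.pyGetD L i 0) (PySem.List.pyGetD a i 0 - PySem.List.pyGetD (pvBuild (fun L i => PySem.List.pyGetD L i 0 + PySem.List.pyGetD t i 0) a.length) i 0)) a.length) ((m : Int) + 1) 0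
        = max (PySem.List.pyGetD (pvBuild (fun L i => max (PySem.List.pyGetD L i 0) (PySem.List.pyGetD a i 0 - PySem.List.pyGetD (pvBuild (fun L i => PySem.List.pyGetD L i 0 + PySem.List.pyGetD t i 0) a.length) i 0)) a.length) (m : Int) 0)
            (PySem.List.pyGetD a (m : Int) 0 - PySem.List.pyGetD (pvBuild (fun L i => PySem.List.pyGetD L i 0 + PySem.List.pyGetD t i 0) a.length) (m : Int) 0) := by
    intro m hmlt
    have hst := pvBuild_getD_stable
      (fun L i => max (PySem.List.pyGetD L i 0) (PySem.List.pyGetD a i 0 - PySem.List.pyGetD (pvBuild (fun L i => PySem.List.pyGetD L i 0 + PySem.List.pyGetD t i 0) a.length) i 0))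
      (le_refl m) (Nat.le_of_lt hmlt)
    rw [pvBuild_getD_succ _ hmlt, hst]
  have hkey := key a t hT hM a.length le_rfl
  simp only [pvBuild] at hkey
  exact hkey.2
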